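-- pv_equiv track=rewrite | github.com/joshuasanty/Random-Projects | Pro6 Text Converter (Simon Edmunds Code)/CapLines.py | capitalize_line_starts
-- ===== SOURCE A (Python) =====
-- def capitalize_line_starts(text: str) -> str:
--     lines = text.split('\n')
--     new_lines = []
--
--     for line in lines:
--         if line:
--             new_lines.append(line[0].upper() + line[1:])
--         else:
--             new_lines.append(line)
--
--     return '\n'.join(new_lines)
-- ===== SOURCE B (Python) =====
-- def capitalize_line_starts(text: str) -> str:
--     out = []
--     at_line_start = True
--     for c in text:
--         if c == '\n':
--             out.append(c)
--             at_line_start = True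
--         elif at_line_start:
--             out.append(c.upper())
--             at_line_start = False
--         else:
--             out.append(c)
--     return ''.join(out)
-- ===== Notes on version B (the rewrite author's own statement) =====
-- stated objective: simpler
-- what changed: Replaced split-into-lines / per-line capitalize / join with a single linear pass over the characters carrying an at-line-start flag, never building a lines list.
import Mathlib
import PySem

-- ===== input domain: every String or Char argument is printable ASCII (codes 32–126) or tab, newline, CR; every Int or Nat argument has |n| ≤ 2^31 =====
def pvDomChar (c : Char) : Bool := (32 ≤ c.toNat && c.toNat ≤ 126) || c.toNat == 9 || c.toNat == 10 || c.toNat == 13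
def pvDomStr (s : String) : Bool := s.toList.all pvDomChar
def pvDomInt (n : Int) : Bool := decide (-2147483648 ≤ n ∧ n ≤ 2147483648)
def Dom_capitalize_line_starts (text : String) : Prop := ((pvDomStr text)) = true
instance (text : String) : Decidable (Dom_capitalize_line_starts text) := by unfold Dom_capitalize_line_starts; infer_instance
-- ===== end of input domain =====

-- B makes one pass over the characters with an at-line-start flag instead of split/map/join (objective: simpler).

-- ===== PORT A =====
-- line[0].upper() + line[1:]: exact on the ASCII domain (upperChar = str.upper per char there)
def pvCapLine (line : List Char) : List Char :=
  match line with
  | [] => line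
  | c :: rest => PySem.Chars.upperChar c :: rest

def capitalize_line_starts (text : String) : String :=
  let lines := PySem.Chars.splitOn text.toList ['\n']
  let new_lines := lines.foldl (fun acc line =>
    if line ≠ [] then acc ++ [pvCapLine line] else acc ++ [line]) []
  String.mk (PySem.Chars.join ['\n'] new_lines)

-- ===== PORT B =====
def capitalize_line_starts_alt (text : String) : String :=
  let st := text.toList.foldl (fun (st : List Char × Bool) c =>
    if c = '\n' then (st.1 ++ [c], true)
    else if st.2 then (st.1 ++ [PySem.Chars.upperChar c], false)
    else (st.1 ++ [c], false)) ([], true)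
  String.mk st.1

-- ===== PRECONDITION & SPEC =====
def Spec_capitalize_line_starts (text : String) (out : String) : Prop := out = capitalize_line_starts_alt text
instance (text : String) (out : String) : Decidable (Spec_capitalize_line_starts text out) := by unfold Spec_capitalize_line_starts; infer_instance

-- ===== CLAIM (what is proved, stated in full; the proofs are below) =====
def Claim_equal_capitalize_line_starts : Prop := ∀ (text : String), Dom_capitalize_line_starts text → Spec_capitalize_line_starts text (capitalize_line_starts text)

-- ===== LEMMAS AND PROOFS =====

-- reference recursion for the split on '\n'
def pvSplit1 : List Char → List (List Char)
  | [] => [[]]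
  | c :: cs => if c = '\n' then [] :: pvSplit1 cs else (pvSplit1 cs).modifyHead (c :: ·)

-- reference recursion for B's loop
def pvGoB : List Char → Bool → List Char
  | [], _ => []
  | c :: cs, b =>
    if c = '\n' then c :: pvGoB cs true
    else (if b then PySem.Chars.upperChar c else c) :: pvGoB cs false

theorem pvSplit1_ne_nil (l : List Char) : pvSplit1 l ≠ [] := by
  cases l with
  | nil => simp [pvSplit1]
  | cons c cs =>
    simp only [pvSplit1]
    split_ifs
    · simp
    · cases h : pvSplit1 cs with
      | nil => exact absurd h (pvSplit1_ne_nil cs)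
      | cons a t => simp

theorem pvGo_acc (sep : List Char) (fuel : Nat) :
    ∀ (l cur : List Char) (acc : List (List Char)),
    PySem.Chars.splitOn.go sep fuel l cur acc = acc.reverse ++ PySem.Chars.splitOn.go sep fuel l cur [] := by
  induction fuel with
  | zero => intro l cur acc; simp [PySem.Chars.splitOn.go]
  | succ f ih =>
    intro l cur acc
    cases l with
    | nil => simp [PySem.Chars.splitOn.go]
    | cons c rest =>
      simp only [PySem.Chars.splitOn.go]
      split_ifs with h
      · rw [ih _ [] (cur.reverse :: acc), ih _ [] [cur.reverse]]
        simp
      · exact ih rest (c :: cur) acc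

theorem pvGo_split1 : ∀ (l : List Char) (fuel : Nat) (cur : List Char), l.length ≤ fuel →
    PySem.Chars.splitOn.go ['\n'] fuel l cur [] = (pvSplit1 l).modifyHead (cur.reverse ++ ·) := by
  intro l
  induction l with
  | nil =>
    intro fuel cur _
    cases fuel <;> simp [PySem.Chars.splitOn.go, pvSplit1]
  | cons c cs ih =>
    intro fuel cur hf
    cases fuel with
    | zero => simp at hf
    | succ f =>
      have hf' : cs.length ≤ f := by simpa using hf
      simp only [PySem.Chars.splitOn.go]
      by_cases h : c = '\n'
      · have hpre : ['\n'].isPrefixOf (c :: cs) = true := by simp [h, List.isPrefixOf]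
        rw [if_pos hpre]
        simp only [List.length_cons, List.length_nil, List.drop_succ_cons, List.drop_zero]
        rw [pvGo_acc, ih f [] hf']
        cases hs : pvSplit1 cs with
        | nil => exact absurd hs (pvSplit1_ne_nil cs)
        | cons a t => simp [pvSplit1, h, hs]
      · rw [if_neg (by simp [List.isPrefixOf]; exact fun hh => h hh.symm)]
        rw [ih f (c :: cur) hf']
        cases hs : pvSplit1 cs with
        | nil => exact absurd hs (pvSplit1_ne_nil cs)
        | cons a t => simp [pvSplit1, h, hs]

theorem pvSplitOn_eq (l : List Char) : PySem.Chars.splitOn l ['\n'] = pvSplit1 l := by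
  unfold PySem.Chars.splitOn
  rw [pvGo_split1 l (l.length + 1) [] (by omega)]
  cases hs : pvSplit1 l with
  | nil => exact absurd hs (pvSplit1_ne_nil l)
  | cons a t => simp

-- the A-side foldl builds the map of pvCapLine
theorem pvFoldl_cap (lines : List (List Char)) : ∀ (acc : List (List Char)),
    lines.foldl (fun acc line =>
      if line ≠ [] then acc ++ [pvCapLine line] else acc ++ [line]) acc
    = acc ++ lines.map pvCapLine := by
  induction lines with
  | nil => intro acc; simp
  | cons a t ih =>
    intro acc
    simp only [List.foldl_cons, List.map_cons]
    by_cases h : a = []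
    · subst h; rw [if_neg (by simp)]; rw [ih]; simp [pvCapLine]
    · rw [if_pos (by simp [h])]; rw [ih]; simp

-- join (h :: t) = h ++ pvRest t
def pvRest (t : List (List Char)) : List Char :=
  match t with
  | [] => []
  | _ :: _ => '\n' :: PySem.Chars.join ['\n'] t

theorem pvJoin_head_rest (h : List Char) (t : List (List Char)) :
    PySem.Chars.join ['\n'] (h :: t) = h ++ pvRest t := by
  cases t with
  | nil => simp [pvRest, PySem.Chars.join, List.intercalate]
  | cons a t' =>
    simp [pvRest, PySem.Chars.join, List.intercalate, List.intersperse]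

-- the heart: join/map-cap of pvSplit1 is B's single pass
theorem pvKey : ∀ (l : List Char),
    (PySem.Chars.join ['\n'] ((pvSplit1 l).map pvCapLine) = pvGoB l true) ∧
    (∀ h t, pvSplit1 l = h :: t → h ++ pvRest (t.map pvCapLine) = pvGoB l false) := by
  intro l
  induction l with
  | nil =>
    constructor
    · simp [pvSplit1, pvCapLine, pvGoB, PySem.Chars.join, List.intercalate]
    · intro h t hs
      simp only [pvSplit1] at hs
      cases hs
      simp [pvRest, pvGoB]
  | cons c cs ih =>
    obtain ⟨ih1, ih2⟩ := ih
    by_cases h : c = '\n'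
    · subst h
      have hsplit : pvSplit1 ('\n' :: cs) = [] :: pvSplit1 cs := by simp [pvSplit1]
      constructor
      · rw [hsplit]
        cases hs : pvSplit1 cs with
        | nil => exact absurd hs (pvSplit1_ne_nil cs)
        | cons a t =>
          simp only [List.map_cons]
          rw [pvJoin_head_rest]
          simp only [pvCapLine, List.nil_append, pvRest]
          rw [hs] at ih1
          simp only [List.map_cons] at ih1
          simp [pvGoB, pvCapLine, ← ih1]
      · intro h t hs
        rw [hsplit] at hs
        cases hs
        cases hs2 : pvSplit1 cs with
        | nil => exact absurd hs2 (pvSplit1_ne_nil cs)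
        | cons a t' =>
          simp only [List.nil_append, pvRest, List.map_cons]
          rw [hs2] at ih1
          simp only [List.map_cons] at ih1
          simp [pvGoB, pvCapLine, ← ih1]
    · cases hs : pvSplit1 cs with
      | nil => exact absurd hs (pvSplit1_ne_nil cs)
      | cons a t =>
        have hsplit : pvSplit1 (c :: cs) = (c :: a) :: t := by
          simp [pvSplit1, h, hs]
        have hfalse : a ++ pvRest (t.map pvCapLine) = pvGoB cs false := ih2 a t hs
        constructor
        · rw [hsplit]
          simp only [List.map_cons]
          rw [pvJoin_head_rest]
          simp only [pvCapLine]
          simp [pvGoB, h, ← hfalse]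
        · intro h' t' hs'
          rw [hsplit] at hs'
          cases hs'
          simp [pvGoB, h, ← hfalse]

-- B's foldl with pair state equals pvGoB
theorem pvFoldB (l : List Char) : ∀ (out : List Char) (b : Bool),
    (l.foldl (fun (st : List Char × Bool) c =>
      if c = '\n' then (st.1 ++ [c], true)
      else if st.2 then (st.1 ++ [PySem.Chars.upperChar c], false)
      else (st.1 ++ [c], false)) (out, b)).1 = out ++ pvGoB l b := by
  induction l with
  | nil => intro out b; simp [pvGoB]
  | cons c cs ih =>
    intro out b
    simp only [List.foldl_cons, pvGoB]
    by_cases h : c = '\n'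
    · simp [h, ih]
    · cases b <;> simp [h, ih]

-- ===== VERDICT (by name: the statement is the Claim_ definition above) =====
theorem capitalize_line_starts_spec : Claim_equal_capitalize_line_starts := by
  intro text _
  unfold Spec_capitalize_line_starts capitalize_line_starts capitalize_line_starts_alt
  simp only
  rw [pvSplitOn_eq, pvFoldl_cap, List.nil_append, (pvKey text.toList).1,
    pvFoldB text.toList [] true, List.nil_append]
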